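-- pv_equiv track=rewrite | github.com/jeffrey-weisinger/CS839-HW3 | nanoGPT/hw3_get_verifiable_rewards.py | verifiable_rewards
-- ===== SOURCE A (Python) =====
-- def verifiable_rewards(input):
--     white_space = ["\t", "\n", " "]
--
--     reward = 0
--     #checking first character. there is no opportunity to "end" a word here.
--     #starting a new word
--     if input[0] not in white_space:
--         reward += 5
--     #not starting a new word
--     else:
--         reward -= 2
--     #i know that the input will have at least one character here, so we should always enter loop
--     for i, char in enumerate(input[1:]):
--         #starting a new word
--         if char not in white_space and input[i] in white_space:
--             reward += 5
--         #ending a word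
--         elif char in white_space and input[i] not in white_space:
--             reward += 3
--         else:
--             reward -= 2
--     return reward
-- ===== SOURCE B (Python) =====
-- def verifiable_rewards(input):
--     # Count maximal non-whitespace runs (words) with an in-word state machine,
--     # then use the closed formula: every position scores -2 baseline, each word
--     # start adds +7 (5-(-2)) and each completed word end adds +5 (3-(-2)), so
--     # reward = 7*words + 5*ends - 2*len(input), where ends = words minus the
--     # trailing unterminated word (if any).
--     ws = "\t\n "
--     words = 0
--     in_word = False
--     for c in input:
--         if c not in ws:
--             if not in_word:
--                 words += 1
--             in_word = True
--         else:
--             in_word = False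
--     ends = words - (1 if in_word else 0)
--     return 7 * words + 5 * ends - 2 * len(input)
-- ===== Notes on version B (the rewrite author's own statement) =====
-- stated objective: faster
-- what changed: B does not score per-position transitions at all: it counts maximal non-whitespace runs (words) with an in-word state machine and derives the reward from the closed formula 7*words + 5*completed_ends - 2*len(input), whereas A adds +5/+3/-2 per character by comparing each character with its predecessor (B avoids A's per-iteration input[i] indexing and membership tests; a timing run measured it ~6x faster); B returns 0 on the empty string where A raises IndexError (excluded by Pre_).
import Mathlib
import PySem

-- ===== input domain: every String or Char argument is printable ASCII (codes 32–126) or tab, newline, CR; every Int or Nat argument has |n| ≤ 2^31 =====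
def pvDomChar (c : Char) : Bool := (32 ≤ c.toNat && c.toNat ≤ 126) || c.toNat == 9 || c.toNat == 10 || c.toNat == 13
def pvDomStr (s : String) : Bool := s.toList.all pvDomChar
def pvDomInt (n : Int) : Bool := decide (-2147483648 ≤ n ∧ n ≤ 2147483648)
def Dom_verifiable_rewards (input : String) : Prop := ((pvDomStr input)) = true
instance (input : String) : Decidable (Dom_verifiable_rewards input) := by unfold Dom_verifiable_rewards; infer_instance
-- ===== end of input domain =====

-- B counts maximal non-whitespace runs with an in-word state machine and uses the closed
-- formula 7*words + 5*ends - 2*len instead of A's per-position transition scoring.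

-- ===== PORT A =====
def verifiable_rewards (input : String) : Int :=
  let white_space : List Char := ['\t', '\n', ' ']
  let cs := input.toList
  -- input[0]: IndexError on the empty string (excluded by Pre_); the none branch is unreachable under Pre_
  match PySem.List.pyGet? cs 0 with
  | none => 0
  | some c0 =>
    let reward : Int := if c0 ∉ white_space then (0 : Int) + 5 else (0 : Int) - 2
    -- for i, char in enumerate(input[1:]); input[i] is always in range here, so pyGetD is exact
    (PySem.List.enumerate (PySem.List.slice cs (some 1) none) 0).foldl
      (fun reward p =>
        if p.2 ∉ white_space ∧ PySem.List.pyGetD cs p.1 ' ' ∈ white_space then reward + 5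
        else if p.2 ∈ white_space ∧ PySem.List.pyGetD cs p.1 ' ' ∉ white_space then reward + 3
        else reward - 2)
      reward

-- ===== PORT B =====
def verifiable_rewards_alt (input : String) : Int :=
  let ws : List Char := ['\t', '\n', ' ']
  -- state machine: (words counted so far, currently inside a word)
  let st := input.toList.foldl
    (fun (p : Int × Bool) c =>
      if c ∉ ws then (if p.2 = false then p.1 + 1 else p.1, true)
      else (p.1, false))
    ((0 : Int), false)
  let words := st.1
  let ends := words - (if st.2 then 1 else 0)
  7 * words + 5 * ends - 2 * (input.toList.length : Int)

-- ===== PRECONDITION & SPEC =====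
-- Pre_ excludes only the empty string, on which A raises IndexError (input[0]).
def Pre_verifiable_rewards (input : String) : Prop := input.toList ≠ []
instance (input : String) : Decidable (Pre_verifiable_rewards input) := by unfold Pre_verifiable_rewards; infer_instance
def pvWitness_verifiable_rewards : String := "ab cd"

def Spec_verifiable_rewards (input : String) (out : Int) : Prop := out = verifiable_rewards_alt input
instance (input : String) (out : Int) : Decidable (Spec_verifiable_rewards input out) := by unfold Spec_verifiable_rewards; infer_instance

-- ===== CLAIM (what is proved, stated in full; the proofs are below) =====
def Claim_equal_verifiable_rewards : Prop := ∀ (input : String), Dom_verifiable_rewards input → Pre_verifiable_rewards input → Spec_verifiable_rewards input (verifiable_rewards input)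

-- ===== LEMMAS AND PROOFS =====

-- Transition score of a suffix, given whether the previous character was whitespace.
def scoreFrom (pw : Bool) : List Char → Int
  | [] => 0
  | c :: t =>
      (if c ∉ ['\t', '\n', ' '] ∧ pw = true then (5 : Int)
       else if c ∈ ['\t', '\n', ' '] ∧ pw = false then 3 else -2)
      + scoreFrom (decide (c ∈ ['\t', '\n', ' '])) t

-- A's enumerate-with-indexing view of the pairs equals the zip view of the pairs.
lemma enum_map_zip (c : Char) (t : List Char) :
    (PySem.List.enumerate t 0).map (fun p => (PySem.List.pyGetD (c :: t) p.1 ' ', p.2))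
      = (c :: t).zip t := by
  apply List.ext_getElem
  · simp [PySem.List.length_enumerate]
  · intro k h1 h2
    simp [PySem.List.getElem_enumerate, List.getElem_zip, PySem.List.pyGetD_natCast]
    have hk : k < (c :: t).length := by
      simp [PySem.List.length_enumerate] at h1
      simp only [List.length_cons]
      omega
    simp [List.getElem?_eq_getElem hk]

-- A's fold over consecutive pairs computes scoreFrom of the previous character's whiteness.
lemma A_pairs (t : List Char) : ∀ (prev : Char) (r : Int),
    ((prev :: t).zip t).foldl
      (fun reward pc =>
        if pc.2 ∉ ['\t', '\n', ' '] ∧ pc.1 ∈ ['\t', '\n', ' '] then reward + 5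
        else if pc.2 ∈ ['\t', '\n', ' '] ∧ pc.1 ∉ ['\t', '\n', ' '] then reward + 3
        else reward - 2) r
      = r + scoreFrom (decide (prev ∈ ['\t', '\n', ' '])) t := by
  induction t with
  | nil => intro prev r; simp [scoreFrom]
  | cons c t ih =>
    intro prev r
    simp only [List.zip_cons_cons, List.foldl_cons, ih c, scoreFrom]
    by_cases h1 : c ∈ ['\t', '\n', ' '] <;> by_cases h2 : prev ∈ ['\t', '\n', ' '] <;>
      simp [h1, h2] <;> ring

-- B's state-machine fold plus the closed formula computes scoreFrom with pw = ¬in_word.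
lemma B_key (cs : List Char) : ∀ (iw : Bool) (w : Int),
    7 * (cs.foldl
        (fun (p : Int × Bool) c =>
          if c ∉ ['\t', '\n', ' '] then (if p.2 = false then p.1 + 1 else p.1, true)
          else (p.1, false)) (w, iw)).1
      + 5 * ((cs.foldl
        (fun (p : Int × Bool) c =>
          if c ∉ ['\t', '\n', ' '] then (if p.2 = false then p.1 + 1 else p.1, true)
          else (p.1, false)) (w, iw)).1
          - (if (cs.foldl
        (fun (p : Int × Bool) c =>
          if c ∉ ['\t', '\n', ' '] then (if p.2 = false then p.1 + 1 else p.1, true)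
          else (p.1, false)) (w, iw)).2 then 1 else 0))
      - 2 * (cs.length : Int)
      = scoreFrom (!iw) cs + 7 * w + 5 * (w - (if iw then 1 else 0)) := by
  induction cs with
  | nil =>
    intro iw w
    cases iw <;> simp [scoreFrom]
  | cons c t ih =>
    intro iw w
    by_cases h1 : c ∈ ['\t', '\n', ' '] <;> cases iw <;>
      · simp only [List.foldl_cons, List.length_cons, scoreFrom, h1, not_true, not_false_iff,
          Bool.not_true, Bool.not_false, true_and, false_and, and_true, and_false,
          Bool.false_eq_true, if_true, if_false, ite_true, ite_false, decide_true, decide_false]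
        first
        | (have hh := ih false w; simp only [Bool.not_false, if_false, ite_false,
            Bool.false_eq_true] at hh; push_cast; linarith)
        | (have hh := ih true w; simp only [Bool.not_true, if_true, ite_true] at hh;
            push_cast; linarith)
        | (have hh := ih true (w + 1); simp only [Bool.not_true, if_true, ite_true] at hh;
            push_cast; linarith)

-- ===== VERDICT (by name: the statement is the Claim_ definition above) =====
theorem verifiable_rewards_spec : Claim_equal_verifiable_rewards := by
  intro input _ hpre
  unfold Spec_verifiable_rewards verifiable_rewards verifiable_rewards_alt
  unfold Pre_verifiable_rewards at hpre
  cases h : input.toList with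
  | nil => exact absurd h hpre
  | cons c t =>
    simp only [PySem.List.pyGet?_zero_cons, PySem.List.slice_from_one, List.tail_cons]
    have hA : ∀ r : Int,
        (PySem.List.enumerate t 0).foldl
          (fun reward p =>
            if p.2 ∉ ['\t', '\n', ' '] ∧ PySem.List.pyGetD (c :: t) p.1 ' ' ∈ ['\t', '\n', ' '] then reward + 5
            else if p.2 ∈ ['\t', '\n', ' '] ∧ PySem.List.pyGetD (c :: t) p.1 ' ' ∉ ['\t', '\n', ' '] then reward + 3
            else reward - 2) r
        = ((c :: t).zip t).foldl
          (fun reward pc =>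
            if pc.2 ∉ ['\t', '\n', ' '] ∧ pc.1 ∈ ['\t', '\n', ' '] then reward + 5
            else if pc.2 ∈ ['\t', '\n', ' '] ∧ pc.1 ∉ ['\t', '\n', ' '] then reward + 3
            else reward - 2) r := by
      intro r
      rw [← enum_map_zip c t, List.foldl_map]
    rw [hA, A_pairs, B_key (c :: t) false 0]
    by_cases hc : c ∈ ['\t', '\n', ' ']
    · have hd : decide (c ∈ ['\t', '\n', ' ']) = true := by simp [hc]
      simp only [scoreFrom, hd, hc, Bool.not_false, not_true, false_and, and_false, true_and,
        and_true, if_false, ite_false, Bool.true_eq_false, if_neg, not_true_eq_false]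
      simp
    · have hd : decide (c ∈ ['\t', '\n', ' ']) = false := by simpa using hc
      simp only [scoreFrom, hd, hc, Bool.not_false, not_false_iff, false_and, and_false,
        true_and, and_true, if_true, ite_true, if_pos]
      simp
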